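-- pv_equiv track=rewrite | github.com/MattShannon/mcd | mcd/dtw.py | projectPathBestCost
-- ===== SOURCE A (Python) =====
-- import itertools as it
--
-- def projectPathAll(path):
--     """Projects a path on to a sequence of sequences of y-indices.
--
--     The resulting sequence has one element for each x-index in the path, and
--     each element is the sequence of y-indices which are paired with the x-index
--     in the binary relation specified by path.
--     """
--     yIndicesSeq = []
--     for i, subPath in it.groupby(path, lambda iAndJ: iAndJ[0]):
--         assert i == len(yIndicesSeq)
--         js = [ j for _, j in subPath ]
--         yIndicesSeq.append(js)
--     return yIndicesSeq
--
-- def projectPathMinIndex(path):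
--     """Projects path on to a sequence of y-indices, one for each x-index.
--
--     Where the path has more than one y-index paired to a given x-index, the
--     smallest such y-index is used.
--     """
--     yIndexSeq = [ min(js) for js in projectPathAll(path) ]
--     return yIndexSeq
--
-- def projectPathBestCost(path, pathCosts):
--     """Projects path on to a sequence of y-indices, one for each x-index.
--
--     Where the path has more than one y-index paired to a given x-index, the
--     y-index with smallest cost is used.
--     """
--     assert len(pathCosts) == len(path)
--
--     # (FIXME : slight abuse of projectPathMinIndex)
--     costedYIndexSeq = projectPathMinIndex([
--         (i, (cost, j))
--         for (i, j), cost in zip(path, pathCosts)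
--     ])
--     yIndexSeq = [ j for _, j in costedYIndexSeq ]
--     return yIndexSeq
-- ===== SOURCE B (Python) =====
-- def projectPathBestCost(path, pathCosts):
--     """Projects path on to a sequence of y-indices, one for each x-index.
--
--     Where the path has more than one y-index paired to a given x-index, the
--     y-index with smallest cost is used (smallest y-index on cost ties).
--     """
--     assert len(pathCosts) == len(path)
--     # validate the path like A does: x-indices must run 0, 1, 2, ... consecutively
--     xs = [i for i, _ in path]
--     assert not xs or xs[0] == 0
--     assert all(b - a in (0, 1) for a, b in zip(xs, xs[1:]))
--     # Stable double sort: first by y-index, then by (x-index, cost),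
--     # so the first entry of each x-index block is its best (cost, y) pair.
--     ranked = sorted(zip(path, pathCosts), key=lambda e: e[0][1])
--     ranked = sorted(ranked, key=lambda e: (e[0][0], e[1]))
--     out = []
--     prev = None
--     for (i, j), cost in ranked:
--         if i != prev:
--             out.append(j)
--             prev = i
--     return out
-- ===== Notes on version B (the rewrite author's own statement) =====
-- stated objective: alternative
-- what changed: Replaces the consecutive groupby with a per-group min pipeline by a sort-then-scan algorithm: a stable double sort (by y-index, then by (x-index, cost)) brings each x-index group's best pair to the front of its block, and one dedupe-first scan emits it.
import Mathlib
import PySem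

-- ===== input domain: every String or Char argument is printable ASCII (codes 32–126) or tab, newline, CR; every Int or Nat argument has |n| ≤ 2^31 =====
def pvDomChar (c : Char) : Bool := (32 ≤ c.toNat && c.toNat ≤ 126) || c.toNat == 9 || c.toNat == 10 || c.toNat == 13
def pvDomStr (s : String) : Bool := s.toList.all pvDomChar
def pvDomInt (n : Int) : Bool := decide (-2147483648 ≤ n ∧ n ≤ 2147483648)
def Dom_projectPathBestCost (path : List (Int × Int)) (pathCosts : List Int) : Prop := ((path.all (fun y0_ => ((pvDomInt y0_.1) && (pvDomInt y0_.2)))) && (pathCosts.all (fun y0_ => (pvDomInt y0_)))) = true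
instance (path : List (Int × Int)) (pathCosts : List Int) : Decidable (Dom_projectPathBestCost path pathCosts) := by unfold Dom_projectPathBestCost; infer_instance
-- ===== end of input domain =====

-- B replaces A's consecutive-groupby-with-min pipeline by sort-then-scan: a stable double sort
-- (by y-index, then by (x-index, cost)) followed by one dedupe-first scan (objective: alternative).


-- ===== PORT A =====
-- it.groupby(·, key = fst), keeping for each group its key and the list of second components
def pyGroupbyFst (l : List (Int × (Int × Int))) : List (Int × List (Int × Int)) :=
  match l with
  | [] => []
  | (k, v) :: rest =>
    match pyGroupbyFst rest with
    | [] => [(k, [v])]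
    | (k', vs) :: gs => if k = k' then (k, v :: vs) :: gs else (k, [v]) :: (k', vs) :: gs

-- Python's min on a list of pairs (lexicographic, first minimum kept); a left fold as min scans
def pyMinPair (m : Int × Int) (xs : List (Int × Int)) : Int × Int :=
  xs.foldl (fun m x => if x.1 < m.1 ∨ (x.1 = m.1 ∧ x.2 < m.2) then x else m) m

-- projectPathAll ∘ min per group. The assert i == len(yIndicesSeq) is covered by Pre_ (A raises
-- outside it); groups produced by pyGroupbyFst are nonempty, so the [] default is unreachable.
def groupMin (g : Int × List (Int × Int)) : Int × Int :=
  match g.2 with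
  | [] => (0, 0)
  | h :: t => pyMinPair h t

def projectPathBestCost (path : List (Int × Int)) (pathCosts : List Int) : List Int :=
  let costed := (path.zip pathCosts).map (fun e => (e.1.1, (e.2, e.1.2)))
  let costedYIndexSeq := (pyGroupbyFst costed).map groupMin
  costedYIndexSeq.map (fun p => p.2)

-- ===== PORT B =====
-- the dedupe-first scan of Source B: out accumulator and prev, the previously emitted x-index
def scanLoop (l : List ((Int × Int) × Int)) (out : List Int) (prev : Option Int) : List Int :=
  match l with
  | [] => out
  | ((i, j), _) :: rest =>
    if some i ≠ prev then scanLoop rest (out ++ [j]) (some i) else scanLoop rest out prev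

-- stable double sort (by y-index, then by the (x-index, cost) pair), then the scan
def projectPathBestCost_alt (path : List (Int × Int)) (pathCosts : List Int) : List Int :=
  let ranked := PySem.List.sorted (path.zip pathCosts) (fun e => e.1.2) false
  let ranked2 := PySem.List.sorted2 ranked (fun e => e.1.1) (fun e => e.2) false
  scanLoop ranked2 [] none

-- ===== PRECONDITION & SPEC =====
-- Pre_ excludes exactly the inputs on which A raises AssertionError: mismatched lengths, or
-- x-indices that are not consecutively grouped starting from 0 and stepping by at most 1.
def Pre_projectPathBestCost (path : List (Int × Int)) (pathCosts : List Int) : Prop :=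
  pathCosts.length = path.length ∧
  ((path.map Prod.fst).head?).getD 0 = 0 ∧
  List.IsChain (fun a b => b = a ∨ b = a + 1) (path.map Prod.fst)
instance (path : List (Int × Int)) (pathCosts : List Int) : Decidable (Pre_projectPathBestCost path pathCosts) := by unfold Pre_projectPathBestCost; infer_instance

def pvWitness_projectPathBestCost : (List (Int × Int)) × List Int :=
  ([(0, 4), (0, 2), (1, 3), (2, 5), (2, 1)], [7, 7, 0, 2, 1])

def Spec_projectPathBestCost (path : List (Int × Int)) (pathCosts : List Int) (out : List Int) : Prop := out = projectPathBestCost_alt path pathCosts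
instance (path : List (Int × Int)) (pathCosts : List Int) (out : List Int) : Decidable (Spec_projectPathBestCost path pathCosts out) := by unfold Spec_projectPathBestCost; infer_instance

-- ===== CLAIM (what is proved, stated in full; the proofs are below) =====
def Claim_equal_projectPathBestCost : Prop := ∀ (path : List (Int × Int)) (pathCosts : List Int), Dom_projectPathBestCost path pathCosts → Pre_projectPathBestCost path pathCosts → Spec_projectPathBestCost path pathCosts (projectPathBestCost path pathCosts)

-- ===== LEMMAS AND PROOFS =====

-- the lexicographic order on (cost, j) pairs and on whole entries (i, then cost, then j)
def le2 (u v : Int × Int) : Prop := u.1 < v.1 ∨ (u.1 = v.1 ∧ u.2 ≤ v.2)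

def lex3 (a b : (Int × Int) × Int) : Prop :=
  a.1.1 < b.1.1 ∨ (a.1.1 = b.1.1 ∧ (a.2 < b.2 ∨ (a.2 = b.2 ∧ a.1.2 ≤ b.1.2)))

-- the (strict) boolean comparison used by the second sort
def lt2B (a b : (Int × Int) × Int) : Bool :=
  decide (a.1.1 < b.1.1) || (!decide (b.1.1 < a.1.1) && decide (a.2 < b.2))

-- the per-consecutive-group best list both pipelines compute (proof-side reference value)
def specOut : List ((Int × Int) × Int) → List Int
  | [] => []
  | e :: r =>
    (pyMinPair (e.2, e.1.2) ((r.takeWhile (fun x => x.1.1 == e.1.1)).map (fun x => (x.2, x.1.2)))).2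
      :: specOut (r.dropWhile (fun x => x.1.1 == e.1.1))
termination_by l => l.length
decreasing_by
  exact Nat.lt_succ_of_le (List.length_dropWhile_le _ _)

-- one-step unfolding of pyGroupbyFst on a cons
theorem pyGroupbyFst_cons (k : Int) (v : Int × Int) (t : List (Int × (Int × Int))) :
    pyGroupbyFst ((k, v) :: t) =
      match pyGroupbyFst t with
      | [] => [(k, [v])]
      | (k', vs) :: gs => if k = k' then (k, v :: vs) :: gs else (k, [v]) :: (k', vs) :: gs := by
  rw [pyGroupbyFst]

-- pyGroupbyFst peels exactly the leading run of its head's key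
theorem pyGroupbyFst_run (m : List (Int × (Int × Int))) : ∀ (c : Int) (v : Int × Int),
    pyGroupbyFst ((c, v) :: m) =
      (c, v :: (m.takeWhile (fun p => p.1 == c)).map Prod.snd) ::
        pyGroupbyFst (m.dropWhile (fun p => p.1 == c)) := by
  induction m with
  | nil => intro c v; simp [pyGroupbyFst]
  | cons p m' ih =>
    intro c v
    obtain ⟨k, w⟩ := p
    by_cases hk : k = c
    · subst hk
      rw [pyGroupbyFst_cons, ih k w]
      simp
    · rw [pyGroupbyFst_cons, ih k w]
      simp only [List.dropWhile_cons, beq_iff_eq, hk, reduceIte]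
      simp [hk, Ne.symm hk, ← ih k w]

-- A's pipeline computes specOut on every input
theorem a_eq_specOut (l : List ((Int × Int) × Int)) :
    ((pyGroupbyFst (l.map (fun e => (e.1.1, (e.2, e.1.2))))).map groupMin).map (fun p => p.2)
      = specOut l := by
  induction l using specOut.induct with
  | case1 => simp [pyGroupbyFst, specOut]
  | case2 e r ih =>
    rw [List.map_cons, pyGroupbyFst_run, List.takeWhile_map, List.dropWhile_map]
    simp only [List.map_cons, List.map_map, Function.comp_def]
    rw [specOut, ← ih]
    simp [groupMin]

-- pyMinPair returns an element of its inputs that is le2-below all of them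
theorem pyMinPair_mem_min (xs : List (Int × Int)) : ∀ (m : Int × Int),
    (pyMinPair m xs ∈ m :: xs) ∧ (∀ y ∈ m :: xs, le2 (pyMinPair m xs) y) := by
  induction xs with
  | nil =>
    intro m
    refine ⟨List.mem_cons_self, ?_⟩
    intro y hy
    have hym : y = m := by simpa using hy
    subst hym
    exact Or.inr ⟨rfl, le_refl _⟩
  | cons x xs ih =>
    intro m
    have tr : ∀ u v w : Int × Int, le2 u v → le2 v w → le2 u w := by
      intro u v w; unfold le2; omega
    by_cases hc : x.1 < m.1 ∨ (x.1 = m.1 ∧ x.2 < m.2)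
    · have hstep : pyMinPair m (x :: xs) = pyMinPair x xs := by
        simp only [pyMinPair, List.foldl_cons, if_pos hc]
      obtain ⟨hmem, hmin⟩ := ih x
      refine ⟨?_, ?_⟩
      · rw [hstep]
        rcases List.mem_cons.mp hmem with h | h
        · rw [h]; exact List.mem_cons_of_mem _ List.mem_cons_self
        · exact List.mem_cons_of_mem _ (List.mem_cons_of_mem _ h)
      · intro y hy
        rw [hstep]
        have hrx : le2 (pyMinPair x xs) x := (ih x).2 x List.mem_cons_self
        rcases List.mem_cons.mp hy with h | h
        · subst h; exact tr _ _ _ hrx (by unfold le2; omega)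
        · exact (ih x).2 y h
    · have hstep : pyMinPair m (x :: xs) = pyMinPair m xs := by
        simp only [pyMinPair, List.foldl_cons, if_neg hc]
      obtain ⟨hmem, hmin⟩ := ih m
      refine ⟨?_, ?_⟩
      · rw [hstep]
        rcases List.mem_cons.mp hmem with h | h
        · rw [h]; exact List.mem_cons_self
        · exact List.mem_cons_of_mem _ (List.mem_cons_of_mem _ h)
      · intro y hy
        rw [hstep]
        have hrm : le2 (pyMinPair m xs) m := hmin m List.mem_cons_self
        rcases List.mem_cons.mp hy with h | h
        · subst h; exact hrm
        rcases List.mem_cons.mp h with h | h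
        · subst h; exact tr _ _ _ hrm (by unfold le2; omega)
        · exact hmin y (List.mem_cons_of_mem _ h)

-- the scan's accumulator is a pure prefix
theorem scanLoop_append (l : List ((Int × Int) × Int)) : ∀ (out : List Int) (prev : Option Int),
    scanLoop l out prev = out ++ scanLoop l [] prev := by
  induction l with
  | nil => simp [scanLoop]
  | cons e rest ih =>
    intro out prev
    obtain ⟨⟨i, j⟩, c⟩ := e
    by_cases h : some i ≠ prev
    · simp only [scanLoop, if_pos h, List.nil_append]
      rw [ih (out ++ [j]), ih [j], List.append_assoc]
    · simp only [scanLoop, if_neg h]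
      exact ih out prev

-- skipping a block whose x-index equals prev
theorem scanLoop_skip (t1 : List ((Int × Int) × Int)) (c : Int)
    (h1 : ∀ x ∈ t1, x.1.1 = c) (t2 : List ((Int × Int) × Int)) :
    scanLoop (t1 ++ t2) [] (some c) = scanLoop t2 [] (some c) := by
  induction t1 with
  | nil => simp
  | cons x t1' ih =>
    obtain ⟨⟨i, j⟩, co⟩ := x
    have hi : i = c := h1 ((i, j), co) List.mem_cons_self
    simp only [List.cons_append, scanLoop, hi, ne_eq, not_true_eq_false, reduceIte]
    exact ih (fun x hx => h1 x (List.mem_cons_of_mem _ hx)) 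

-- prev is irrelevant when the next x-index differs from it
theorem scanLoop_reset (t2 : List ((Int × Int) × Int)) (c : Int)
    (h : ∀ x ∈ t2, x.1.1 ≠ c) :
    scanLoop t2 [] (some c) = scanLoop t2 [] none := by
  cases t2 with
  | nil => rfl
  | cons x rest =>
    obtain ⟨⟨i, j⟩, co⟩ := x
    have hi : i ≠ c := h ((i, j), co) List.mem_cons_self
    simp [scanLoop, hi]

-- in a nondecreasing lower-bounded list, takeWhile/dropWhile on the minimal key are filters
theorem split_filter (c : Int) (t : List ((Int × Int) × Int))
    (hp : t.Pairwise (fun a b => a.1.1 ≤ b.1.1)) (hlb : ∀ x ∈ t, c ≤ x.1.1) :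
    t.takeWhile (fun x => x.1.1 == c) = t.filter (fun x => x.1.1 == c) ∧
    t.dropWhile (fun x => x.1.1 == c) = t.filter (fun x => !(x.1.1 == c)) := by
  induction t with
  | nil => simp
  | cons x t' ih =>
    rcases List.pairwise_cons.mp hp with ⟨hx', hp'⟩
    by_cases hxc : x.1.1 = c
    · have := ih hp' (fun y hy => hlb y (List.mem_cons_of_mem _ hy))
      simp [hxc, this]
    · have hcx : c < x.1.1 :=
        lt_of_le_of_ne (hlb x List.mem_cons_self) (fun h => hxc h.symm)
      have hall : ∀ b ∈ t', ¬(b.1.1 == c) = true := by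
        intro b hb; have := hx' b hb; simp; omega
      have h1 : t'.filter (fun x => x.1.1 == c) = [] := List.filter_eq_nil_iff.mpr hall
      have h2 : t'.filter (fun x => !(x.1.1 == c)) = t' := by
        rw [List.filter_eq_self]; intro a ha; simpa using hall a ha
      simp [hxc, h1, h2]

-- inserting into a lex3-sorted list keeps it lex3-sorted when ties came earlier
theorem insertBy_pairwise_lex3 (x : (Int × Int) × Int) (acc : List ((Int × Int) × Int))
    (hacc : acc.Pairwise lex3)
    (hx : ∀ a ∈ acc, a.1.1 = x.1.1 ∧ a.2 = x.2 → a.1.2 ≤ x.1.2) :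
    (PySem.List.insertBy lt2B x acc).Pairwise lex3 := by
  induction acc with
  | nil => rw [PySem.List.insertBy]; exact List.pairwise_singleton _ _
  | cons y ys ih =>
    rcases List.pairwise_cons.mp hacc with ⟨hyys, hys⟩
    rw [PySem.List.insertBy]
    by_cases hb : lt2B x y = true
    · rw [if_pos hb]
      unfold lt2B at hb; simp only [Bool.or_eq_true, Bool.and_eq_true, Bool.not_eq_true',
        decide_eq_true_eq, decide_eq_false_iff_not] at hb
      refine List.pairwise_cons.mpr ⟨?_, hacc⟩
      intro z hz
      rcases List.mem_cons.mp hz with h | h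
      · subst h; unfold lex3; omega
      · have hyz := hyys z h
        unfold lex3 at hyz ⊢; omega
    · rw [if_neg hb]
      unfold lt2B at hb; simp only [Bool.or_eq_true, Bool.and_eq_true, Bool.not_eq_true',
        decide_eq_true_eq, decide_eq_false_iff_not, not_or, not_and] at hb
      refine List.pairwise_cons.mpr
        ⟨?_, ih hys (fun a ha t => hx a (List.mem_cons_of_mem _ ha) t)⟩
      intro z hz
      rcases (PySem.List.mem_insertBy _ _ _ _).mp hz with h | h
      · subst h
        have htie := hx y List.mem_cons_self
        unfold lex3; omega
      · exact hyys z h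

-- the insertion-sort fold yields a lex3-sorted list (stability on (i, cost) ties)
theorem foldl_insertBy_pairwise_lex3 (l : List ((Int × Int) × Int)) :
    ∀ (acc : List ((Int × Int) × Int)), acc.Pairwise lex3 →
    (∀ a ∈ acc, ∀ b ∈ l, a.1.1 = b.1.1 ∧ a.2 = b.2 → a.1.2 ≤ b.1.2) →
    l.Pairwise (fun a b => a.1.1 = b.1.1 ∧ a.2 = b.2 → a.1.2 ≤ b.1.2) →
    (l.foldl (fun acc x => PySem.List.insertBy lt2B x acc) acc).Pairwise lex3 := by
  induction l with
  | nil => intro acc hacc _ _; simpa using hacc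
  | cons x l' ih =>
    intro acc hacc hcross hl
    rcases List.pairwise_cons.mp hl with ⟨hxl', hl'⟩
    rw [List.foldl_cons]
    refine ih _ (insertBy_pairwise_lex3 x acc hacc
      (fun a ha t => hcross a ha x List.mem_cons_self t)) ?_ hl'
    intro a ha b hb t
    rcases (PySem.List.mem_insertBy _ _ _ _).mp ha with h | h
    · subst h; exact hxl' b hb t
    · exact hcross a h b (List.mem_cons_of_mem _ hb) t

-- MAIN: scanning any lex3-sorted permutation of a key-nondecreasing list gives specOut
theorem scan_sorted_eq_specOut (n : Nat) : ∀ (l t : List ((Int × Int) × Int)) (prev : Option Int),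
    l.length ≤ n →
    l.Pairwise (fun a b => a.1.1 ≤ b.1.1) →
    t.Perm l → t.Pairwise lex3 →
    (∀ k, prev = some k → ∀ x ∈ l, k ≠ x.1.1) →
    scanLoop t [] prev = specOut l := by
  induction n with
  | zero =>
    intro l t prev hn _ hperm _ _
    have hl : l = [] := List.eq_nil_of_length_eq_zero (Nat.le_zero.mp hn)
    subst hl
    rw [List.Perm.eq_nil hperm]
    simp [scanLoop, specOut]
  | succ n ih =>
    intro l t prev hn hmono hperm hlex hprev
    cases l with
    | nil =>
      rw [List.Perm.eq_nil hperm]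
      simp [scanLoop, specOut]
    | cons e r =>
      rcases List.pairwise_cons.mp hmono with ⟨her, hr⟩
      have hsplit : e :: r
          = (e :: r.takeWhile (fun x => x.1.1 == e.1.1))
            ++ r.dropWhile (fun x => x.1.1 == e.1.1) := by
        simp [List.takeWhile_append_dropWhile]
      have hrun : ∀ x ∈ e :: r.takeWhile (fun x => x.1.1 == e.1.1), x.1.1 = e.1.1 := by
        intro x hx
        rcases List.mem_cons.mp hx with h | h
        · rw [h]
        · exact beq_iff_eq.mp (List.mem_takeWhile_imp (p := fun y : (Int × Int) × Int => y.1.1 == e.1.1) h)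
      have hdwgt : ∀ x ∈ r.dropWhile (fun x => x.1.1 == e.1.1), e.1.1 < x.1.1 := by
        cases hdwE : r.dropWhile (fun x => x.1.1 == e.1.1) with
        | nil => simp
        | cons d dw' =>
          have hdk : ¬ d.1.1 = e.1.1 := by
            have := List.head?_dropWhile_not (fun x : (Int × Int) × Int => x.1.1 == e.1.1) r
            rw [hdwE] at this
            simpa using this
          have hdr : d ∈ r := (List.dropWhile_sublist _).subset (by rw [hdwE]; exact List.mem_cons_self)
          have hdc : e.1.1 < d.1.1 := lt_of_le_of_ne (her d hdr) (fun h => hdk h.symm)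
          have hpdw : (d :: dw').Pairwise (fun a b => a.1.1 ≤ b.1.1) := by
            rw [← hdwE]; exact List.Pairwise.sublist (List.dropWhile_sublist _) hr
          rcases List.pairwise_cons.mp hpdw with ⟨hd', _⟩
          intro x hx
          rcases List.mem_cons.mp hx with h | h
          · rw [h]; exact hdc
          · exact lt_of_lt_of_le hdc (hd' x h)
      have hlb_l : ∀ x ∈ e :: r, e.1.1 ≤ x.1.1 := by
        intro x hx
        rcases List.mem_cons.mp hx with h | h
        · rw [h]
        · exact her x h
      have hlb_t : ∀ x ∈ t, e.1.1 ≤ x.1.1 := fun x hx => hlb_l x (hperm.mem_iff.mp hx)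
      have htp : t.Pairwise (fun a b => a.1.1 ≤ b.1.1) := by
        refine hlex.imp ?_
        intro a b hab; unfold lex3 at hab; omega
      obtain ⟨hTW, hDW⟩ := split_filter e.1.1 t htp hlb_t
      have hlf1 : (e :: r).filter (fun x => x.1.1 == e.1.1)
          = e :: r.takeWhile (fun x => x.1.1 == e.1.1) := by
        conv_lhs => rw [hsplit]
        rw [List.filter_append]
        rw [List.filter_eq_self.mpr (fun a ha => by simpa using hrun a ha),
          List.filter_eq_nil_iff.mpr (fun a ha => by
            have := hdwgt a ha; simp; omega)]
        simp
      have hlf2 : (e :: r).filter (fun x => !(x.1.1 == e.1.1))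
          = r.dropWhile (fun x => x.1.1 == e.1.1) := by
        conv_lhs => rw [hsplit]
        rw [List.filter_append]
        rw [List.filter_eq_nil_iff.mpr (fun a ha => by simp [hrun a ha]),
          List.filter_eq_self.mpr (fun a ha => by
            have := hdwgt a ha; simp; omega)]
        simp
      have ht1perm : (t.takeWhile (fun x => x.1.1 == e.1.1)).Perm
          (e :: r.takeWhile (fun x => x.1.1 == e.1.1)) := by
        rw [hTW, ← hlf1]; exact hperm.filter _
      have ht2perm : (t.dropWhile (fun x => x.1.1 == e.1.1)).Perm
          (r.dropWhile (fun x => x.1.1 == e.1.1)) := by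
        rw [hDW, ← hlf2]; exact hperm.filter _
      cases ht1E : t.takeWhile (fun x => x.1.1 == e.1.1) with
      | nil =>
        exfalso
        rw [ht1E] at ht1perm
        exact List.cons_ne_nil _ _ (List.Perm.nil_eq ht1perm).symm
      | cons h1 t1' =>
        obtain ⟨⟨i1, j1⟩, co1⟩ := h1
        have hmem_tw : ∀ x ∈ ((i1, j1), co1) :: t1', x.1.1 = e.1.1 := by
          intro x hx
          rw [← ht1E] at hx
          exact beq_iff_eq.mp (List.mem_takeWhile_imp (p := fun y : (Int × Int) × Int => y.1.1 == e.1.1) hx)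
        have hi1 : i1 = e.1.1 := hmem_tw _ List.mem_cons_self
        have hts : t = ((i1, j1), co1) :: (t1' ++ t.dropWhile (fun x => x.1.1 == e.1.1)) := by
          conv_lhs => rw [← List.takeWhile_append_dropWhile
            (p := fun x => x.1.1 == e.1.1) (l := t)]
          rw [ht1E]; rfl
        have hprevne : some i1 ≠ prev := by
          cases prev with
          | none => simp
          | some k =>
            have hk := hprev k rfl ((i1, j1), co1) (hperm.mem_iff.mp (by rw [hts]; exact List.mem_cons_self))
            simp at hk ⊢
            exact fun h => hk h.symm
        have hdw_ne : ∀ x ∈ t.dropWhile (fun x => x.1.1 == e.1.1), x.1.1 ≠ e.1.1 := by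
          intro x hx
          rw [hDW] at hx
          have := List.of_mem_filter hx
          simpa using this
        -- unfold one scan step, skip the rest of the block, reset prev, and recurse
        have hscan : scanLoop t [] prev
            = j1 :: scanLoop (t.dropWhile (fun x => x.1.1 == e.1.1)) [] none := by
          conv_lhs => rw [hts]
          show (if some i1 ≠ prev then
              scanLoop (t1' ++ t.dropWhile (fun x => x.1.1 == e.1.1)) ([] ++ [j1]) (some i1)
            else scanLoop (t1' ++ t.dropWhile (fun x => x.1.1 == e.1.1)) [] prev)
            = j1 :: scanLoop (t.dropWhile (fun x => x.1.1 == e.1.1)) [] none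
          rw [if_pos hprevne, List.nil_append, scanLoop_append, hi1,
            scanLoop_skip t1' e.1.1 (fun x hx => hmem_tw x (List.mem_cons_of_mem _ hx)),
            scanLoop_reset _ _ hdw_ne]
          rfl
        -- the recursive call
        have hrec : scanLoop (t.dropWhile (fun x => x.1.1 == e.1.1)) [] none
            = specOut (r.dropWhile (fun x => x.1.1 == e.1.1)) := by
          refine ih _ _ none ?_ (List.Pairwise.sublist (List.dropWhile_sublist _) hr) ht2perm
            (List.Pairwise.sublist (List.dropWhile_sublist _) hlex) (by intro k hk; cases hk)
          exact le_trans (List.length_dropWhile_le _ _) (Nat.le_of_succ_le_succ hn)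
        -- the emitted y-index equals the group's best
        obtain ⟨qmem, qmin⟩ := pyMinPair_mem_min
          ((r.takeWhile (fun x => x.1.1 == e.1.1)).map (fun x => (x.2, x.1.2))) (e.2, e.1.2)
        have hmapeq : (e.2, e.1.2) :: (r.takeWhile (fun x => x.1.1 == e.1.1)).map (fun x => (x.2, x.1.2))
            = (e :: r.takeWhile (fun x => x.1.1 == e.1.1)).map (fun x => (x.2, x.1.2)) := by
          simp
        have hh1mem : ((i1, j1), co1) ∈ e :: r.takeWhile (fun x => x.1.1 == e.1.1) :=
          ht1perm.mem_iff.mp (by rw [ht1E]; exact List.mem_cons_self)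
        have hle : ∀ y ∈ e :: r.takeWhile (fun x => x.1.1 == e.1.1),
            le2 (co1, j1) (y.2, y.1.2) := by
          intro y hy
          have hy' : y ∈ ((i1, j1), co1) :: t1' := by rw [← ht1E]; exact ht1perm.mem_iff.mpr hy
          rcases List.mem_cons.mp hy' with h | h
          · rw [h]; exact Or.inr ⟨rfl, le_refl _⟩
          · have hlexy : lex3 ((i1, j1), co1) y := by
              rw [hts] at hlex
              exact (List.pairwise_cons.mp hlex).1 y (List.mem_append_left _ h)
            have hyk : y.1.1 = e.1.1 := hrun y hy
            unfold lex3 at hlexy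
            unfold le2
            simp only at hlexy ⊢
            omega
        have hq1 : le2 (pyMinPair (e.2, e.1.2)
            ((r.takeWhile (fun x => x.1.1 == e.1.1)).map (fun x => (x.2, x.1.2)))) (co1, j1) := by
          refine qmin _ ?_
          rw [hmapeq]
          exact List.mem_map.mpr ⟨((i1, j1), co1), hh1mem, rfl⟩
        have hq2 : le2 (co1, j1) (pyMinPair (e.2, e.1.2)
            ((r.takeWhile (fun x => x.1.1 == e.1.1)).map (fun x => (x.2, x.1.2)))) := by
          rw [hmapeq] at qmem
          obtain ⟨y, hy, hyq⟩ := List.mem_map.mp qmem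
          rw [← hyq]
          exact hle y hy
        have hj1 : (pyMinPair (e.2, e.1.2)
            ((r.takeWhile (fun x => x.1.1 == e.1.1)).map (fun x => (x.2, x.1.2)))).2 = j1 := by
          unfold le2 at hq1 hq2
          omega
        rw [hscan, hrec, specOut, hj1]

-- ===== VERDICT (by name: the statement is the Claim_ definition above) =====
theorem projectPathBestCost_spec : Claim_equal_projectPathBestCost := by
  intro path pathCosts _ hpre
  unfold Spec_projectPathBestCost
  obtain ⟨hlen, _, hchain⟩ := hpre
  have hmapfst : (path.zip pathCosts).map Prod.fst = path :=
    List.map_fst_zip (le_of_eq hlen.symm)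
  have hpw_path : (path.map Prod.fst).Pairwise (· ≤ ·) :=
    (hchain.imp (by intro a b hab; omega)).pairwise
  have hmap2 : (path.zip pathCosts).map (fun e => e.1.1) = path.map Prod.fst := by
    rw [show (fun e : (Int × Int) × Int => e.1.1) = Prod.fst ∘ Prod.fst from rfl,
      ← List.map_map, hmapfst]
  have hpw : (path.zip pathCosts).Pairwise (fun a b => a.1.1 ≤ b.1.1) := by
    refine List.pairwise_map.mp ?_
    rw [hmap2]; exact hpw_path
  have hperm : (PySem.List.sorted2
        (PySem.List.sorted (path.zip pathCosts) (fun e => e.1.2) false)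
        (fun e => e.1.1) (fun e => e.2) false).Perm (path.zip pathCosts) :=
    (PySem.List.sorted2_perm _ _ _ _).trans (PySem.List.sorted_perm _ _ _)
  have hs1 : (PySem.List.sorted (path.zip pathCosts) (fun e => e.1.2) false).Pairwise
      (fun a b => a.1.2 ≤ b.1.2) := PySem.List.sorted_pairwise _ _
  have hlexs : (PySem.List.sorted2
        (PySem.List.sorted (path.zip pathCosts) (fun e => e.1.2) false)
        (fun e => e.1.1) (fun e => e.2) false).Pairwise lex3 := by
    rw [show PySem.List.sorted2
        (PySem.List.sorted (path.zip pathCosts) (fun e => e.1.2) false)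
        (fun e => e.1.1) (fun e => e.2) false
      = (PySem.List.sorted (path.zip pathCosts) (fun e => e.1.2) false).foldl
          (fun acc x => PySem.List.insertBy lt2B x acc) [] from rfl]
    exact foldl_insertBy_pairwise_lex3 _ [] List.Pairwise.nil (by simp)
      (hs1.imp (by intro a b hab _; exact hab))
  have hA : projectPathBestCost path pathCosts = specOut (path.zip pathCosts) := a_eq_specOut _
  have hB : projectPathBestCost_alt path pathCosts = specOut (path.zip pathCosts) := by
    show scanLoop (PySem.List.sorted2
        (PySem.List.sorted (path.zip pathCosts) (fun e => e.1.2) false)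
        (fun e => e.1.1) (fun e => e.2) false) [] none = specOut (path.zip pathCosts)
    exact scan_sorted_eq_specOut (path.zip pathCosts).length _ _ none (le_refl _)
      hpw hperm hlexs (by intro k hk; cases hk)
  rw [hA, hB]
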